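-- pv_equiv track=rewrite | github.com/thecesspit/AdventOfCode2023 | Day15.py | calculate_hash
-- ===== SOURCE A (Python) =====
-- def calculate_hash(operation):
--
--     box = 0
--     label = ""
--     for c in operation:
--         ascii_v = ord(c)
--         if ascii_v == 61:
--             instruction = operation.split("=")[1]
--             break
--         # if "-"
--         if ascii_v == 45:
--             instruction = c
--             break
--         else:
--             box = box + ascii_v
--             box = box * 17
--             box = box % 256
--             label = label + c
--
--     return box, label, instruction
-- ===== SOURCE B (Python) =====
-- def calculate_hash(operation):
--     i = next(j for j, c in enumerate(operation) if c in "=-")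
--     label = operation[:i]
--     box = 0
--     for c in label:
--         box = (box + ord(c)) * 17 % 256
--     instruction = operation.split("=")[1] if operation[i] == "=" else "-"
--     return box, label, instruction
-- ===== Notes on version B (the rewrite author's own statement) =====
-- stated objective: simpler
-- what changed: B replaces A's single interleaved break-loop (accumulating hash and label char by char) with a find-first-separator pass, a slice for the label, and a separate hash pass over the label.
import Mathlib
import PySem

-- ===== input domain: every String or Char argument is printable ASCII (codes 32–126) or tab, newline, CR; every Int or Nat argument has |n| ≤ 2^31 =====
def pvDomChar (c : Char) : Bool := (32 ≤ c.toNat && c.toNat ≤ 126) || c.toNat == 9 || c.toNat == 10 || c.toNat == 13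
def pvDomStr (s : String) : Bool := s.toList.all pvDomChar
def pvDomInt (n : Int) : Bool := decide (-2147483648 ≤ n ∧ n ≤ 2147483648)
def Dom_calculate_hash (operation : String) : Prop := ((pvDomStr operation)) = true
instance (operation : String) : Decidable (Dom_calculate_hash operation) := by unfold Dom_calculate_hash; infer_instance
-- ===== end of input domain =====

-- B finds the first '='/'-' index, slices the label and hashes it in a separate pass (simpler decomposition); equivalence proved on inputs containing a separator (A raises UnboundLocalError otherwise).


-- ===== PORT A =====
-- operation.split("=")[1] : the '=' branch guarantees index 1 exists, so pyGetD is exact there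
def pvSplitEq (operation : String) : String :=
  PySem.List.pyGetD ((PySem.Str.split? operation "=").getD []) 1 ""

-- the for-loop of A; none = loop finished without break (instruction unbound → UnboundLocalError)
def pvALoop (operation : String) : List Char → Int → List Char → Option (Int × String × String)
  | [], _, _ => none
  | c :: rest, box, label =>
    if (c.toNat : Int) = 61 then
      some (box, String.ofList label, pvSplitEq operation)
    else if (c.toNat : Int) = 45 then
      some (box, String.ofList label, String.ofList [c])
    else
      pvALoop operation rest (PySem.Int.mod ((box + (c.toNat : Int)) * 17) 256) (label ++ [c])

def calculate_hash (operation : String) : Int × String × String :=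
  (pvALoop operation operation.toList 0 []).getD (0, "", "")

-- ===== PORT B =====
-- next(j for j, c in enumerate(operation) if c in "=-")
def pvFindSep : List Char → Nat → Option Nat
  | [], _ => none
  | c :: rest, j => if c = '=' ∨ c = '-' then some j else pvFindSep rest (j + 1)

-- for c in label: box = (box + ord(c)) * 17 % 256
def pvHashLoop : List Char → Int → Int
  | [], box => box
  | c :: rest, box => pvHashLoop rest (PySem.Int.mod ((box + (c.toNat : Int)) * 17) 256)

def calculate_hash_alt (operation : String) : Int × String × String :=
  match pvFindSep operation.toList 0 with
  | none => (0, "", "")      -- next() raises StopIteration; outside Pre_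
  | some i =>
    let label := PySem.List.slice operation.toList none (some (i : Int))
    let box := pvHashLoop label 0
    let instruction :=
      if PySem.List.pyGetD operation.toList (i : Int) ' ' = '=' then pvSplitEq operation else "-"
    (box, String.ofList label, instruction)

-- ===== PRECONDITION & SPEC =====
-- Pre_ excludes strings containing neither '=' nor '-', on which A raises UnboundLocalError.
def Pre_calculate_hash (operation : String) : Prop :=
  '=' ∈ operation.toList ∨ '-' ∈ operation.toList
instance (operation : String) : Decidable (Pre_calculate_hash operation) := by
  unfold Pre_calculate_hash; infer_instance
def pvWitness_calculate_hash : String := "ab=7"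
def Spec_calculate_hash (operation : String) (out : Int × String × String) : Prop := out = calculate_hash_alt operation
instance (operation : String) (out : Int × String × String) : Decidable (Spec_calculate_hash operation out) := by unfold Spec_calculate_hash; infer_instance

-- ===== CLAIM (what is proved, stated in full; the proofs are below) =====
def Claim_equal_calculate_hash : Prop := ∀ (operation : String), Dom_calculate_hash operation → Pre_calculate_hash operation → Spec_calculate_hash operation (calculate_hash operation)

-- ===== LEMMAS AND PROOFS =====

theorem pvCharEq (c d : Char) (h : c.toNat = d.toNat) : c = d := by
  have hv : c.val.toNat = d.val.toNat := h
  exact Char.ext (UInt32.toNat_inj.mp hv)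

theorem pvFindSep_shift (cs : List Char) (j : Nat) :
    pvFindSep cs j = (pvFindSep cs 0).map (j + ·) := by
  induction cs generalizing j with
  | nil => simp [pvFindSep]
  | cons c rest ih =>
    by_cases h : c = '=' ∨ c = '-'
    · simp [pvFindSep, h]
    · rw [pvFindSep, if_neg h, ih (j + 1)]
      conv_rhs => rw [pvFindSep, if_neg h, ih 1]
      rw [Option.map_map]
      cases pvFindSep rest 0 with
      | none => rfl
      | some a => simp [Nat.add_assoc]

theorem pvFindSep_none_iff (cs : List Char) :
    pvFindSep cs 0 = none ↔ ∀ c ∈ cs, ¬(c = '=' ∨ c = '-') := by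
  induction cs with
  | nil => simp [pvFindSep]
  | cons c rest ih =>
    by_cases h : c = '=' ∨ c = '-'
    · rw [pvFindSep, if_pos h]
      refine ⟨fun hc => by simp at hc, fun hall => absurd h (hall c (by simp))⟩
    · rw [pvFindSep, if_neg h, pvFindSep_shift]
      constructor
      · intro hc x hx
        have hn : pvFindSep rest 0 = none := by
          cases hfs : pvFindSep rest 0 <;> simp [hfs] at hc ⊢
        rcases List.mem_cons.mp hx with rfl | hx
        · exact h
        · exact ih.mp hn x hx
      · intro hall
        have hn : pvFindSep rest 0 = none :=
          ih.mpr (fun x hx => hall x (List.mem_cons_of_mem _ hx))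
        simp [hn]

theorem pvALoop_eq (operation : String) (cs : List Char) (box : Int) (label : List Char) :
    pvALoop operation cs box label =
      match pvFindSep cs 0 with
      | none => none
      | some i =>
        some (pvHashLoop (cs.take i) box,
              String.ofList (label ++ cs.take i),
              if cs.getD i ' ' = '=' then pvSplitEq operation else "-") := by
  induction cs generalizing box label with
  | nil => simp [pvALoop, pvFindSep]
  | cons c rest ih =>
    by_cases he : c = '='
    · subst he
      rw [pvALoop, if_pos (by decide), pvFindSep, if_pos (by simp)]
      simp [pvHashLoop]
    · by_cases hm : c = '-'
      · have h61 : ¬ ((c.toNat : Int) = 61) := by subst hm; decide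
        subst hm
        rw [pvALoop, if_neg h61, if_pos (by decide), pvFindSep, if_pos (by simp)]
        simp [pvHashLoop]
      · have h61 : ¬ ((c.toNat : Int) = 61) := by
          intro h; exact he (pvCharEq c '=' (by exact_mod_cast h))
        have h45 : ¬ ((c.toNat : Int) = 45) := by
          intro h; exact hm (pvCharEq c '-' (by exact_mod_cast h))
        rw [pvALoop, if_neg h61, if_neg h45, ih]
        rw [show pvFindSep (c :: rest) 0 = (pvFindSep rest 0).map (1 + ·) by
          rw [pvFindSep, if_neg (by tauto)]; exact pvFindSep_shift rest 1]
        cases hf : pvFindSep rest 0 with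
        | none => simp
        | some i =>
          simp only [Option.map_some]
          have ht : (c :: rest).take (1 + i) = c :: rest.take i := by
            rw [Nat.add_comm]; rfl
          have hg : (c :: rest)[1 + i]? = rest[i]? := by
            rw [Nat.add_comm]; rfl
          simp [ht, hg, pvHashLoop]

theorem calculate_hash_eq_alt (operation : String) (hpre : Pre_calculate_hash operation) :
    calculate_hash operation = calculate_hash_alt operation := by
  unfold calculate_hash calculate_hash_alt
  rw [pvALoop_eq]
  cases hf : pvFindSep operation.toList 0 with
  | none =>
    exfalso
    rcases hpre with h | h <;>
      exact (pvFindSep_none_iff operation.toList).mp hf _ h (by tauto)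
  | some i =>
    simp only [Option.getD_some]
    have hs : PySem.List.slice operation.toList none (some (i : Int)) =
        operation.toList.take i := PySem.List.slice_to_natCast _ i
    have hg : PySem.List.pyGetD operation.toList (i : Int) ' ' =
        operation.toList.getD i ' ' := PySem.List.pyGetD_natCast _ _ _
    simp [hs, hg]

-- ===== VERDICT (by name: the statement is the Claim_ definition above) =====
theorem calculate_hash_spec : Claim_equal_calculate_hash := by
  intro operation _ hpre
  unfold Spec_calculate_hash
  exact calculate_hash_eq_alt operation hpre
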